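-- pv_equiv track=rewrite | github.com/Gavroche11/FeedingIndex | 0923 supp.py | representation
-- ===== SOURCE A (Python) =====
-- def successive(frames):
--     result = list()
--     i = 0
--     if len(frames) == 0:
--         return list()
--     else:
--         while i in range(len(frames)):
--             if i == 0:
--                 newlist = [frames[i]]
--             elif frames[i] - frames[i - 1] == 1:
--                 newlist.append(frames[i])
--             else:
--                 result.append(newlist)
--                 newlist = [frames[i]]
--             i += 1
--         result.append(newlist)
--         return result
--
-- def representation(frames, x=1):
--     assert x == 0 or x == 1 or x == 2, 'Input 0, 1, or 2 for first, middle, or last frame respectively'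
--     sf = successive(frames)
--     result = list()
--     for i, j in enumerate(sf):
--         if x == 0:
--             result.append(j[0])
--         elif x == 1:
--             result.append(round((j[0] + j[-1]) / 2))
--         else:
--             result.append(j[-1])
--     return result
-- ===== SOURCE B (Python) =====
-- def representation(frames, x=1):
--     assert x == 0 or x == 1 or x == 2, 'Input 0, 1, or 2 for first, middle, or last frame respectively'
--     result = []
--     if not frames:
--         return result
--     first = prev = frames[0]
--     for f in frames[1:]:
--         if f - prev == 1:
--             prev = f
--         else:
--             result.append(first if x == 0 else prev if x == 2 else round((first + prev) / 2))
--             first = prev = f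
--     result.append(first if x == 0 else prev if x == 2 else round((first + prev) / 2))
--     return result
-- ===== Notes on version B (the rewrite author's own statement) =====
-- stated objective: simpler
-- what changed: Fuses A's two passes (build a list of runs, then index each run) into one streaming loop that keeps only the current run's first and previous value and emits each run's representative as the run ends, building no intermediate list of runs.
import Mathlib
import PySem

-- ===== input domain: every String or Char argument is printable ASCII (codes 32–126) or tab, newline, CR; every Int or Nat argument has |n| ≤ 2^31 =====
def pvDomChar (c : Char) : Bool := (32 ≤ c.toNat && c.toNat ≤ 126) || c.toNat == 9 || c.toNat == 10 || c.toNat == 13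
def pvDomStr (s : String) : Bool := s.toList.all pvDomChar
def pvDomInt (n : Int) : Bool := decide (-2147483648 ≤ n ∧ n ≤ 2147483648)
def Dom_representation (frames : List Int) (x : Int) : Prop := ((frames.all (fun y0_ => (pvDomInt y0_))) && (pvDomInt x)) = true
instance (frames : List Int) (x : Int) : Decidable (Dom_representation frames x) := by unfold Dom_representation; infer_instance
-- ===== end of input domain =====

-- B fuses A's two passes (build list of runs, then index each run) into one streaming loop
-- keeping only the current run's first and previous value; same cost, simpler (objective: simpler).

-- Shared helper: Python's round((a+b)/2) with a+b = s. On Dom |s| ≤ 2^33 < 2^53 so the float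
-- s/2 is exact; round is half-to-even. For even s this is s/2 (exact division); for odd s the
-- value is l + 0.5 with l = (s-1)/2 (exact: s-1 even), and round picks whichever of l, l+1 is even.
def pyRound2 (s : Int) : Int :=
  if s % 2 = 0 then s / 2
  else
    let l := (s - 1) / 2
    if l % 2 = 0 then l else l + 1

-- ===== PORT A =====
-- loop body of A's while over range(len(frames)); frames[i] → getD (index always in range)
def sucBody (frames : List Int) (st : List (List Int) × List Int) (i : Nat) : List (List Int) × List Int :=
  if i = 0 then (st.1, [frames.getD i 0])
  else if frames.getD i 0 - frames.getD (i - 1) 0 = 1 then (st.1, st.2 ++ [frames.getD i 0])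
  else (st.1 ++ [st.2], [frames.getD i 0])

def successive (frames : List Int) : List (List Int) :=
  if frames.length = 0 then []
  else
    let st := (List.range frames.length).foldl (sucBody frames) ([], [])
    st.1 ++ [st.2]

-- j[0], j[-1] → pyGet? with default (the runs produced by successive are never empty, so no IndexError)
def representation (frames : List Int) (x : Int) : List Int :=
  let sf := successive frames
  (PySem.List.enumerate sf).foldl (fun result ij =>
    if x = 0 then result ++ [(PySem.List.pyGet? ij.2 0).getD 0]
    else if x = 1 then result ++ [pyRound2 ((PySem.List.pyGet? ij.2 0).getD 0 + (PySem.List.pyGet? ij.2 (-1)).getD 0)]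
    else result ++ [(PySem.List.pyGet? ij.2 (-1)).getD 0]) []

-- ===== PORT B =====
-- the conditional expression `first if x == 0 else prev if x == 2 else round((first+prev)/2)`
def rep1 (x first prev : Int) : Int :=
  if x = 0 then first else if x = 2 then prev else pyRound2 (first + prev)

-- B's loop over frames[1:], state = (first, prev) of the current run; final append after the loop
def altLoop (x first prev : Int) : List Int → List Int
  | [] => [rep1 x first prev]
  | f :: rest => if f - prev = 1 then altLoop x first f rest else rep1 x first prev :: altLoop x f f rest

def representation_alt (frames : List Int) (x : Int) : List Int :=
  match frames with
  | [] => []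
  | f :: rest => altLoop x f f rest

-- ===== PRECONDITION & SPEC =====
-- A's assert raises AssertionError unless x ∈ {0, 1, 2}; exactly those inputs are excluded.
def Pre_representation (frames : List Int) (x : Int) : Prop := x = 0 ∨ x = 1 ∨ x = 2
instance (frames : List Int) (x : Int) : Decidable (Pre_representation frames x) := by unfold Pre_representation; infer_instance
def pvWitness_representation : List Int × Int := ([1, 2, 3, 7, 8, 10], 1)

def Spec_representation (frames : List Int) (x : Int) (out : List Int) : Prop := out = representation_alt frames x
instance (frames : List Int) (x : Int) (out : List Int) : Decidable (Spec_representation frames x out) := by unfold Spec_representation; infer_instance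

-- ===== CLAIM (what is proved, stated in full; the proofs are below) =====
def Claim_equal_representation : Prop := ∀ (frames : List Int) (x : Int), Dom_representation frames x → Pre_representation frames x → Spec_representation frames x (representation frames x)

-- ===== LEMMAS AND PROOFS =====

-- proof-side: the run-building loop as structural recursion on the tail, carrying prev
def runsGo (rest : List Int) (st : List (List Int) × List Int) (prev : Int) : List (List Int) × List Int :=
  match rest with
  | [] => st
  | g :: rest' =>
    if g - prev = 1 then runsGo rest' (st.1, st.2 ++ [g]) g
    else runsGo rest' (st.1 ++ [st.2], [g]) g

-- proof-side: the representative A picks from one run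
def repOf (x : Int) (j : List Int) : Int :=
  if x = 0 then (PySem.List.pyGet? j 0).getD 0
  else if x = 1 then pyRound2 ((PySem.List.pyGet? j 0).getD 0 + (PySem.List.pyGet? j (-1)).getD 0)
  else (PySem.List.pyGet? j (-1)).getD 0

lemma getD_append_left (pre rest : List Int) (n : Nat) (h : n < pre.length) :
    (pre ++ rest).getD n 0 = pre.getD n 0 := by
  simp [List.getD, List.getElem?_append_left h]

lemma getD_append_at (pre : List Int) (g : Int) (rest : List Int) :
    (pre ++ g :: rest).getD pre.length 0 = g := by
  have := List.getElem?_append_right (Nat.le_refl pre.length) (l₂ := g :: rest)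
  simp [List.getD, this]

lemma getD_getLast? (pre : List Int) (prev : Int) (h : pre.getLast? = some prev) :
    pre.getD (pre.length - 1) 0 = prev := by
  have hne : pre ≠ [] := by intro hn; simp [hn] at h
  rw [List.getLast?_eq_getElem?] at h
  simp [List.getD, h]

lemma foldA (rest : List Int) : ∀ (pre : List Int) (st : List (List Int) × List Int) (prev : Int),
    pre.getLast? = some prev →
    (List.range' pre.length rest.length).foldl (sucBody (pre ++ rest)) st = runsGo rest st prev := by
  induction rest with
  | nil => intro pre st prev _; simp [runsGo]
  | cons g rest' ih =>
    intro pre st prev hlast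
    have hne : pre ≠ [] := by intro hn; simp [hn] at hlast
    have hpos : 0 < pre.length := List.length_pos_iff.mpr hne
    rw [List.length_cons, List.range'_succ, List.foldl_cons]
    have hbody : sucBody (pre ++ g :: rest') st pre.length =
        (if g - prev = 1 then (st.1, st.2 ++ [g]) else (st.1 ++ [st.2], [g])) := by
      have h1 : (pre ++ g :: rest').getD pre.length 0 = g := getD_append_at pre g rest'
      have h2 : (pre ++ g :: rest').getD (pre.length - 1) 0 = prev := by
        rw [getD_append_left pre (g :: rest') _ (by omega)]
        exact getD_getLast? pre prev hlast
      unfold sucBody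
      rw [if_neg (Nat.pos_iff_ne_zero.mp hpos), h2, h1]
    rw [hbody]
    have hresplit : pre ++ g :: rest' = (pre ++ [g]) ++ rest' := by simp
    have hlen : pre.length + 1 = (pre ++ [g]).length := by simp
    have hlast' : (pre ++ [g]).getLast? = some g := by simp
    by_cases hg : g - prev = 1 <;>
      simp only [hg, if_pos, ite_false, runsGo] <;>
      rw [hresplit, hlen, ih (pre ++ [g]) _ g hlast']

lemma successive_cons (f : Int) (rest : List Int) :
    successive (f :: rest) = (runsGo rest ([], [f]) f).1 ++ [(runsGo rest ([], [f]) f).2] := by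
  have hfirst : sucBody (f :: rest) ([], []) 0 = ([], [f]) := by simp [sucBody]
  have hmain := foldA rest [f] ([], [f]) f (by simp)
  simp only [List.singleton_append, List.length_singleton] at hmain
  have h0 : List.range (rest.length + 1) = 0 :: List.range' 1 rest.length := by
    rw [List.range_eq_range', List.range'_succ]
  simp only [successive, List.length_cons, Nat.succ_ne_zero, if_false]
  rw [h0, List.foldl_cons, hfirst, hmain]

lemma foldRep (x : Int) (sf : List (List Int)) : ∀ (k : Int) (acc : List Int),
    (PySem.List.enumerate sf k).foldl (fun result ij =>
      if x = 0 then result ++ [(PySem.List.pyGet? ij.2 0).getD 0]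
      else if x = 1 then result ++ [pyRound2 ((PySem.List.pyGet? ij.2 0).getD 0 + (PySem.List.pyGet? ij.2 (-1)).getD 0)]
      else result ++ [(PySem.List.pyGet? ij.2 (-1)).getD 0]) acc
    = acc ++ sf.map (repOf x) := by
  induction sf with
  | nil => intro k acc; simp [PySem.List.enumerate_nil]
  | cons j sf' ih =>
    intro k acc
    rw [PySem.List.enumerate_cons, List.foldl_cons, List.map_cons, ih]
    by_cases h0 : x = 0
    · simp [h0, repOf]
    · by_cases h1 : x = 1 <;> simp [h0, h1, repOf]

lemma representation_eq_map (frames : List Int) (x : Int) :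
    representation frames x = (successive frames).map (repOf x) := by
  simpa [representation] using foldRep x (successive frames) 0 []

lemma repOf_eq_rep1 (x : Int) (nl : List Int) (first prev : Int)
    (hx : x = 0 ∨ x = 1 ∨ x = 2)
    (hh : nl.head? = some first) (hl : nl.getLast? = some prev) :
    repOf x nl = rep1 x first prev := by
  have h0 : (PySem.List.pyGet? nl 0).getD 0 = first := by
    rw [PySem.List.pyGet?_zero, ← List.head?_eq_getElem?, hh]; rfl
  have hm1 : (PySem.List.pyGet? nl (-1)).getD 0 = prev := by
    rw [PySem.List.pyGet?_neg_one, hl]; rfl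
  rcases hx with h | h | h <;> simp [repOf, rep1, h, h0, hm1]

lemma foldB (x : Int) (hx : x = 0 ∨ x = 1 ∨ x = 2) (rest : List Int) :
    ∀ (res : List (List Int)) (nl : List Int) (first prev : Int),
    nl.head? = some first → nl.getLast? = some prev →
    ((runsGo rest (res, nl) prev).1 ++ [(runsGo rest (res, nl) prev).2]).map (repOf x)
      = res.map (repOf x) ++ altLoop x first prev rest := by
  induction rest with
  | nil =>
    intro res nl first prev hh hl
    simp [runsGo, altLoop, repOf_eq_rep1 x nl first prev hx hh hl]
  | cons g rest' ih =>
    intro res nl first prev hh hl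
    have hnl : nl ≠ [] := by intro hn; simp [hn] at hh
    by_cases hg : g - prev = 1
    · have hh' : (nl ++ [g]).head? = some first := by
        rw [List.head?_append_of_ne_nil _ hnl]  -- head of nl ++ [g] is head of nl
        exact hh
      have hl' : (nl ++ [g]).getLast? = some g := by simp
      simp only [runsGo, hg, ite_true, altLoop]
      exact ih res (nl ++ [g]) first g hh' hl'
    · simp only [runsGo, hg, ite_false, altLoop]
      rw [ih (res ++ [nl]) [g] g g rfl rfl]
      simp [repOf_eq_rep1 x nl first prev hx hh hl]

-- ===== VERDICT (by name: the statement is the Claim_ definition above) =====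
theorem representation_spec : Claim_equal_representation := by
  intro frames x _ hpre
  unfold Spec_representation
  match frames with
  | [] => simp [representation, successive, representation_alt, PySem.List.enumerate_nil]
  | f :: rest =>
    rw [representation_eq_map, successive_cons, representation_alt]
    simpa using foldB x hpre rest [] [f] f f rfl rfl
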